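-- pv_equiv track=rewrite | github.com/D3lynChann/Display2019 | HOUGH/CLEARHOUGH/clearHough.py | SobelIt
-- ===== SOURCE A (Python) =====
-- import ReadAndWriteImage, copy, math
--
-- def SobelIt(data):
--     h = len(data); w = len(data[0])
--     Gxs = [[0 for ctr in range(w)] for itr in range(h)]
--     Gs = copy.deepcopy(data); Gys = copy.deepcopy(Gxs); tangs = copy.deepcopy(Gxs)
--     for ctr in range(1, h - 1):
--         for itr in range(1, w - 1):
--             Gxs[ctr][itr] = data[ctr - 1][itr + 1] + 2 * data[ctr][itr + 1] + data[ctr + 1][itr + 1] - (data[ctr - 1][itr - 1] + 2 * data[ctr][itr - 1] + data[ctr + 1][itr - 1])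
--             Gys[ctr][itr] = data[ctr - 1][itr - 1] + 2 * data[ctr - 1][itr] + data[ctr - 1][itr + 1] - (data[ctr + 1][itr - 1] + 2 * data[ctr + 1][itr] + data[ctr + 1][itr + 1])
--             Gs[ctr][itr] = abs(Gxs[ctr][itr] - Gys[ctr][itr])
--     return Gxs, Gys, Gs
-- ===== SOURCE B (Python) =====
-- def SobelIt(data):
--     h, w = len(data), len(data[0])
--     if h < 3 or w < 3:
--         # no interior pixels: gradients are all-zero grids, Gs is just a copy of data
--         return ([[0] * w for _ in range(h)],
--                 [[0] * w for _ in range(h)],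
--                 [list(row) for row in data])
--     # separable Sobel: central differences first, then the 1-2-1 smoothing
--     dx = [[row[j + 1] - row[j - 1] if 0 < j < w - 1 else 0 for j in range(w)] for row in data]
--     dy = [[data[i - 1][j] - data[i + 1][j] if 0 < i < h - 1 else 0 for j in range(w)] for i in range(h)]
--     Gxs = [[dx[i - 1][j] + 2 * dx[i][j] + dx[i + 1][j] if 0 < i < h - 1 and 0 < j < w - 1 else 0
--             for j in range(w)] for i in range(h)]
--     Gys = [[dy[i][j - 1] + 2 * dy[i][j] + dy[i][j + 1] if 0 < i < h - 1 and 0 < j < w - 1 else 0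
--             for j in range(w)] for i in range(h)]
--     Gs = [[abs(Gxs[i][j] - Gys[i][j]) if 0 < i < h - 1 and 0 < j < w - 1 else data[i][j]
--            for j in range(w)] for i in range(h)]
--     return Gxs, Gys, Gs
-- ===== Notes on version B (the rewrite author's own statement) =====
-- stated objective: alternative
-- what changed: Replaces the in-place nested-loop 3x3 stencil with a separable two-pass scheme: central-difference tables dx/dy are built first and then smoothed with 1-2-1 weights, all grids constructed functionally by comprehensions instead of mutating zero/deepcopy grids.
import Mathlib
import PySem

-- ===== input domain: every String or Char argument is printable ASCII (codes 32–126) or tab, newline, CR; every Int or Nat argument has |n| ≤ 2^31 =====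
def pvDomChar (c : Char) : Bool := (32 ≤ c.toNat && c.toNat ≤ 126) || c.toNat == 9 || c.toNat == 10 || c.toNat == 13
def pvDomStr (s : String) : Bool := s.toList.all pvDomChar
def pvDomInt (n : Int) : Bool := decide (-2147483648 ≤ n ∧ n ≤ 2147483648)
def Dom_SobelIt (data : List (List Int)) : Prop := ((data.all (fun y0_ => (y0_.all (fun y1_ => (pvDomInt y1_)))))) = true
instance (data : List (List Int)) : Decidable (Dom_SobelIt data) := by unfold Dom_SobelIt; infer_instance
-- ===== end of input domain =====

-- B replaces A's in-place nested-loop 3x3 Sobel stencil by a separable two-pass scheme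
-- (central-difference tables dx/dy, then 1-2-1 smoothing), building all grids by comprehensions
-- instead of mutating zero-initialized/deepcopied grids; same cost, different decomposition.


-- ===== PORT A =====
-- cell read data[i][j] (total via getD; precondition keeps all reads in range)
def pvGet2 (m : List (List Int)) (i j : Nat) : Int := (m.getD i []).getD j 0

-- cell write m[i][j] = v
def pvSet2 (m : List (List Int)) (i j : Nat) (v : Int) : List (List Int) :=
  m.set i ((m.getD i []).set j v)

-- the body of A's inner loop, for row ctr and column itr
def pvStepA (data : List (List Int))
    (st : List (List Int) × List (List Int) × List (List Int)) (p : Nat × Nat) :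
    List (List Int) × List (List Int) × List (List Int) :=
  let gxs := st.1; let gys := st.2.1; let gs := st.2.2
  let ctr := p.1; let itr := p.2
  let gx := pvGet2 data (ctr-1) (itr+1) + 2 * pvGet2 data ctr (itr+1) + pvGet2 data (ctr+1) (itr+1)
            - (pvGet2 data (ctr-1) (itr-1) + 2 * pvGet2 data ctr (itr-1) + pvGet2 data (ctr+1) (itr-1))
  let gy := pvGet2 data (ctr-1) (itr-1) + 2 * pvGet2 data (ctr-1) itr + pvGet2 data (ctr-1) (itr+1)
            - (pvGet2 data (ctr+1) (itr-1) + 2 * pvGet2 data (ctr+1) itr + pvGet2 data (ctr+1) (itr+1))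
  let gxs' := pvSet2 gxs ctr itr gx
  let gys' := pvSet2 gys ctr itr gy
  let gs' := pvSet2 gs ctr itr |pvGet2 gxs' ctr itr - pvGet2 gys' ctr itr|
  (gxs', gys', gs')

def SobelIt (data : List (List Int)) : List (List Int) × List (List Int) × List (List Int) :=
  let h := data.length
  let w := data.headI.length
  let Gxs := List.replicate h (List.replicate w (0 : Int))
  let Gs := data
  let Gys := Gxs
  (List.range' 1 (h-2)).foldl (fun st ctr =>
    (List.range' 1 (w-2)).foldl (fun st itr => pvStepA data st (ctr, itr)) st) (Gxs, Gys, Gs)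

-- ===== PORT B =====
-- B-side helpers: each named helper is one comprehension of Source B
def pvTbl (h w : Nat) (f : Nat → Nat → Int) : List (List Int) :=
  (List.range h).map (fun i => (List.range w).map (f i))

def pvDx (data : List (List Int)) (w : Nat) : List (List Int) :=
  data.map (fun row => (List.range w).map (fun j =>
    if 0 < j ∧ j < w - 1 then row.getD (j+1) 0 - row.getD (j-1) 0 else 0))

def pvDy (data : List (List Int)) (h w : Nat) : List (List Int) :=
  pvTbl h w (fun i j =>
    if 0 < i ∧ i < h - 1 then pvGet2 data (i-1) j - pvGet2 data (i+1) j else 0)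

def pvGxsB (data : List (List Int)) (h w : Nat) : List (List Int) :=
  pvTbl h w (fun i j =>
    if (0 < i ∧ i < h - 1) ∧ (0 < j ∧ j < w - 1) then
      pvGet2 (pvDx data w) (i-1) j + 2 * pvGet2 (pvDx data w) i j + pvGet2 (pvDx data w) (i+1) j
    else 0)

def pvGysB (data : List (List Int)) (h w : Nat) : List (List Int) :=
  pvTbl h w (fun i j =>
    if (0 < i ∧ i < h - 1) ∧ (0 < j ∧ j < w - 1) then
      pvGet2 (pvDy data h w) i (j-1) + 2 * pvGet2 (pvDy data h w) i j + pvGet2 (pvDy data h w) i (j+1)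
    else 0)

def pvGsB (data : List (List Int)) (h w : Nat) : List (List Int) :=
  pvTbl h w (fun i j =>
    if (0 < i ∧ i < h - 1) ∧ (0 < j ∧ j < w - 1) then
      |pvGet2 (pvGxsB data h w) i j - pvGet2 (pvGysB data h w) i j|
    else pvGet2 data i j)

def SobelIt_alt (data : List (List Int)) : List (List Int) × List (List Int) × List (List Int) :=
  let h := data.length
  let w := data.headI.length
  if h < 3 ∨ w < 3 then
    (List.replicate h (List.replicate w (0 : Int)),
     List.replicate h (List.replicate w (0 : Int)),
     data.map (fun row => row))
  else
    (pvGxsB data h w, pvGysB data h w, pvGsB data h w)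

-- ===== PRECONDITION & SPEC =====
-- Pre_ excludes the empty list (A raises IndexError on data[0]) and, when the grid has an
-- interior (h>2 and w>2), rows whose length differs from the first row's: shorter rows make
-- A raise IndexError, while longer rows are an accidental-width corner (w is read off the
-- first row only, and A's deepcopy keeps the ragged tails beyond w in Gs).
def Pre_SobelIt (data : List (List Int)) : Prop :=
  data ≠ [] ∧ (2 < data.length → 2 < data.headI.length →
    ∀ row ∈ data, row.length = data.headI.length)
instance (data : List (List Int)) : Decidable (Pre_SobelIt data) := by
  unfold Pre_SobelIt; infer_instance

def pvWitness_SobelIt : List (List Int) := [[1, 2, 3], [4, 5, 6], [7, 8, 9]]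

def Spec_SobelIt (data : List (List Int)) (out : List (List Int) × List (List Int) × List (List Int)) : Prop := out = SobelIt_alt data
instance (data : List (List Int)) (out : List (List Int) × List (List Int) × List (List Int)) : Decidable (Spec_SobelIt data out) := by unfold Spec_SobelIt; infer_instance

-- ===== CLAIM (what is proved, stated in full; the proofs are below) =====
def Claim_equal_SobelIt : Prop := ∀ (data : List (List Int)), Dom_SobelIt data → Pre_SobelIt data → Spec_SobelIt data (SobelIt data)

-- ===== LEMMAS AND PROOFS =====

-- the gx / gy values A writes at interior cell (i, j); they depend only on data
def pvVX (data : List (List Int)) (i j : Nat) : Int :=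
  pvGet2 data (i-1) (j+1) + 2 * pvGet2 data i (j+1) + pvGet2 data (i+1) (j+1)
  - (pvGet2 data (i-1) (j-1) + 2 * pvGet2 data i (j-1) + pvGet2 data (i+1) (j-1))

def pvVY (data : List (List Int)) (i j : Nat) : Int :=
  pvGet2 data (i-1) (j-1) + 2 * pvGet2 data (i-1) j + pvGet2 data (i-1) (j+1)
  - (pvGet2 data (i+1) (j-1) + 2 * pvGet2 data (i+1) j + pvGet2 data (i+1) (j+1))

-- grid shape: h rows, each of length w
def pvSh (h w : Nat) (m : List (List Int)) : Prop :=
  m.length = h ∧ ∀ row ∈ m, row.length = w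

lemma pvSh_row {h w : Nat} {m : List (List Int)} (hsh : pvSh h w m) {i : Nat} (hi : i < h) :
    (m.getD i []).length = w := by
  rw [List.getD_eq_getElem m [] (by rw [hsh.1]; exact hi)]
  exact hsh.2 _ (List.getElem_mem _)

lemma pvSh_set2 {h w : Nat} {m : List (List Int)} (hsh : pvSh h w m) (i j : Nat) (v : Int) :
    pvSh h w (pvSet2 m i j v) := by
  rcases Nat.lt_or_ge i m.length with hi | hi
  · refine ⟨by simp [pvSet2, hsh.1], ?_⟩
    intro row hrow
    rcases List.mem_or_eq_of_mem_set hrow with h1 | h2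
    · exact hsh.2 _ h1
    · subst h2
      rw [List.length_set, List.getD_eq_getElem m [] hi]
      exact hsh.2 _ (List.getElem_mem _)
  · unfold pvSet2
    rw [List.set_eq_of_length_le hi]
    exact hsh

lemma pvGet2_set2_self {m : List (List Int)} {i j : Nat} (v : Int)
    (hi : i < m.length) (hj : j < (m.getD i []).length) :
    pvGet2 (pvSet2 m i j v) i j = v := by
  unfold pvGet2 pvSet2
  rw [List.getD_eq_getElem _ [] (by simpa using hi)]
  simp only [List.getElem_set]
  rw [List.getD_eq_getElem _ 0 (by simpa using hj)]
  simp

lemma pvGet2_set2_ne {m : List (List Int)} {i j i' j' : Nat} (v : Int)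
    (hne : (i', j') ≠ (i, j)) :
    pvGet2 (pvSet2 m i j v) i' j' = pvGet2 m i' j' := by
  by_cases hii : i' = i
  · subst hii
    have hjj : j' ≠ j := by intro hc; exact hne (by simp [hc])
    rcases Nat.lt_or_ge i' m.length with hi | hi
    · unfold pvGet2 pvSet2
      rw [List.getD_eq_getElem _ [] (by simpa using hi)]
      simp only [List.getElem_set]
      simp [List.getD_eq_getElem?_getD, hjj.symm]
    · unfold pvGet2 pvSet2
      rw [List.set_eq_of_length_le (by simp [hi])]
  · unfold pvGet2 pvSet2
    simp [List.getD_eq_getElem?_getD, (Ne.symm hii)]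

lemma pv_foldl_nest {S : Type} (f : S → Nat × Nat → S) (outer inner : List Nat) (init : S) :
    outer.foldl (fun st i => inner.foldl (fun st j => f st (i, j)) st) init
      = (outer.flatMap (fun i => inner.map (fun j => (i, j)))).foldl f init := by
  induction outer generalizing init with
  | nil => rfl
  | cons a t ih => simp [List.foldl_append, List.foldl_map, ih]

lemma pv_foldl_fixed {S : Type} (l : List Nat) (init : S) :
    l.foldl (fun st _ => st) init = init := by
  induction l generalizing init with
  | nil => rfl
  | cons a t ih => simp only [List.foldl_cons]; exact ih init

-- loop characterization: folding A's step over a list of in-range cells writes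
-- pvVX / pvVY / |pvVX - pvVY| exactly at those cells, preserving shapes
lemma pv_fold_cells (data : List (List Int)) (h w : Nat)
    (ps : List (Nat × Nat)) (hps : ∀ p ∈ ps, p.1 < h ∧ p.2 < w) :
    ∀ gxs gys gs, pvSh h w gxs → pvSh h w gys → pvSh h w gs →
      pvSh h w (ps.foldl (pvStepA data) (gxs, gys, gs)).1 ∧
      pvSh h w (ps.foldl (pvStepA data) (gxs, gys, gs)).2.1 ∧
      pvSh h w (ps.foldl (pvStepA data) (gxs, gys, gs)).2.2 ∧
      ∀ i j,
        pvGet2 (ps.foldl (pvStepA data) (gxs, gys, gs)).1 i j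
          = (if (i, j) ∈ ps then pvVX data i j else pvGet2 gxs i j) ∧
        pvGet2 (ps.foldl (pvStepA data) (gxs, gys, gs)).2.1 i j
          = (if (i, j) ∈ ps then pvVY data i j else pvGet2 gys i j) ∧
        pvGet2 (ps.foldl (pvStepA data) (gxs, gys, gs)).2.2 i j
          = (if (i, j) ∈ ps then |pvVX data i j - pvVY data i j| else pvGet2 gs i j) := by
  induction ps with
  | nil => intro gxs gys gs h1 h2 h3; exact ⟨h1, h2, h3, fun i j => by simp⟩
  | cons p t ih =>
    intro gxs gys gs h1 h2 h3
    obtain ⟨hp1, hp2⟩ := hps p List.mem_cons_self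
    have hps' : ∀ q ∈ t, q.1 < h ∧ q.2 < w := fun q hq => hps q (List.mem_cons_of_mem _ hq)
    have hstep : pvStepA data (gxs, gys, gs) p
        = (pvSet2 gxs p.1 p.2 (pvVX data p.1 p.2),
           pvSet2 gys p.1 p.2 (pvVY data p.1 p.2),
           pvSet2 gs p.1 p.2 |pvVX data p.1 p.2 - pvVY data p.1 p.2|) := by
      simp only [pvStepA, pvVX, pvVY]
      rw [pvGet2_set2_self _ (by rw [h1.1]; exact hp1) (by rw [pvSh_row h1 hp1]; exact hp2),
          pvGet2_set2_self _ (by rw [h2.1]; exact hp1) (by rw [pvSh_row h2 hp1]; exact hp2)]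
    rw [List.foldl_cons, hstep]
    obtain ⟨k1, k2, k3, kcell⟩ :=
      ih hps' _ _ _ (pvSh_set2 h1 _ _ _) (pvSh_set2 h2 _ _ _) (pvSh_set2 h3 _ _ _)
    refine ⟨k1, k2, k3, fun i j => ?_⟩
    obtain ⟨c1, c2, c3⟩ := kcell i j
    by_cases hmem : (i, j) ∈ t
    · simp [c1, c2, c3, hmem, List.mem_cons]
    · by_cases hp : (i, j) = p
      · subst hp
        rw [c1, c2, c3]
        simp only [if_false, List.mem_cons, hmem, or_false]
        have e1 := pvGet2_set2_self (m := gxs) (pvVX data i j) (by rw [h1.1]; exact hp1)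
          (by rw [pvSh_row h1 hp1]; exact hp2)
        have e2 := pvGet2_set2_self (m := gys) (pvVY data i j) (by rw [h2.1]; exact hp1)
          (by rw [pvSh_row h2 hp1]; exact hp2)
        have e3 := pvGet2_set2_self (m := gs) (|pvVX data i j - pvVY data i j|) (by rw [h3.1]; exact hp1)
          (by rw [pvSh_row h3 hp1]; exact hp2)
        simp [e1, e2, e3]
      · rw [c1, c2, c3]
        simp only [if_false, List.mem_cons, hmem, hp, or_false]
        rw [pvGet2_set2_ne _ hp, pvGet2_set2_ne _ hp, pvGet2_set2_ne _ hp]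
        simp

lemma pvGet2_replicate (h w i j : Nat) :
    pvGet2 (List.replicate h (List.replicate w (0 : Int))) i j = 0 := by
  unfold pvGet2
  rcases Nat.lt_or_ge i h with hi | hi
  · rw [List.getD_eq_getElem _ [] (by simpa using hi)]
    simp only [List.getElem_replicate]
    rcases Nat.lt_or_ge j w with hj | hj
    · rw [List.getD_eq_getElem _ 0 (by simpa using hj)]; simp
    · have hrow : (List.replicate w (0 : Int)).getD j 0 = 0 :=
        List.getD_eq_default _ _ (by simpa using hj)
      rw [hrow]
  · have hout : (List.replicate h (List.replicate w (0 : Int))).getD i [] = [] :=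
      List.getD_eq_default _ _ (by simpa using hi)
    rw [hout]
    rfl

lemma pvTbl_get2 (h w : Nat) (f : Nat → Nat → Int) (i j : Nat) :
    pvGet2 (pvTbl h w f) i j = if i < h ∧ j < w then f i j else 0 := by
  unfold pvGet2 pvTbl
  rcases Nat.lt_or_ge i h with hi | hi
  · rw [PySem.List.getD_map_range _ h i [] hi]
    rcases Nat.lt_or_ge j w with hj | hj
    · rw [PySem.List.getD_map_range _ w j 0 hj]; simp [hi, hj]
    · have hrow : ((List.range w).map (f i)).getD j 0 = 0 :=
        List.getD_eq_default _ _ (by simpa using hj)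
      rw [hrow]
      simp [Nat.not_lt.2 hj]
  · have hout : ((List.range h).map (fun i => (List.range w).map (f i))).getD i [] = [] :=
      List.getD_eq_default _ _ (by simpa using hi)
    rw [hout]
    simp [Nat.not_lt.2 hi]

lemma pvDx_get2 (data : List (List Int)) (w i j : Nat) (hi : i < data.length) (hj : j < w) :
    pvGet2 (pvDx data w) i j
      = if 0 < j ∧ j < w - 1 then pvGet2 data i (j+1) - pvGet2 data i (j-1) else 0 := by
  unfold pvGet2 pvDx
  rw [List.getD_eq_getElem _ [] (by simpa using hi)]
  simp only [List.getElem_map]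
  rw [PySem.List.getD_map_range _ w j 0 hj]
  rw [List.getD_eq_getElem data [] hi]

-- interior cells of B's tables are exactly A's values
lemma pvGxsB_cell (data : List (List Int)) (h w i j : Nat)
    (hh : h = data.length)
    (hi1 : 0 < i) (hi2 : i < h - 1) (hj1 : 0 < j) (hj2 : j < w - 1) :
    pvGet2 (pvGxsB data h w) i j = pvVX data i j := by
  have hiw : i < h := by omega
  have hjw : j < w := by omega
  rw [pvGxsB, pvTbl_get2]
  simp only [hiw, hjw, hi1, hi2, hj1, hj2, and_self, if_true]
  rw [pvDx_get2 data w (i-1) j (by omega) hjw, pvDx_get2 data w i j (by omega) hjw,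
      pvDx_get2 data w (i+1) j (by omega) hjw]
  simp only [hj1, hj2, and_self, if_true]
  unfold pvVX
  ring

lemma pvGysB_cell (data : List (List Int)) (h w i j : Nat)
    (hi1 : 0 < i) (hi2 : i < h - 1) (hj1 : 0 < j) (hj2 : j < w - 1) :
    pvGet2 (pvGysB data h w) i j = pvVY data i j := by
  have hiw : i < h := by omega
  have hjw : j < w := by omega
  rw [pvGysB, pvTbl_get2]
  simp only [hiw, hjw, hi1, hi2, hj1, hj2, and_self, if_true]
  rw [pvDy, pvTbl_get2, pvTbl_get2, pvTbl_get2]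
  simp only [hiw, hi1, hi2, and_self, if_true, true_and]
  have hb1 : j - 1 < w := by omega
  have hb2 : j + 1 < w := by omega
  simp only [hb1, hb2, hjw, if_true]
  unfold pvVY
  ring

lemma pvGet2_eq_getElem {m : List (List Int)} {i j : Nat} (hi : i < m.length)
    (hj : j < m[i].length) : m[i][j] = pvGet2 m i j := by
  unfold pvGet2
  rw [List.getD_eq_getElem m [] hi, List.getD_eq_getElem _ 0 hj]

-- ===== VERDICT (by name: the statement is the Claim_ definition above) =====
theorem SobelIt_spec : Claim_equal_SobelIt := by
  intro data _hdom hpre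
  unfold Spec_SobelIt
  obtain ⟨hne, hrect⟩ := hpre
  have hA0 : SobelIt data
      = (List.range' 1 (data.length - 2)).foldl (fun st ctr =>
          (List.range' 1 (data.headI.length - 2)).foldl
            (fun st itr => pvStepA data st (ctr, itr)) st)
        (List.replicate data.length (List.replicate data.headI.length (0 : Int)),
         List.replicate data.length (List.replicate data.headI.length (0 : Int)), data) := rfl
  by_cases hdeg : data.length < 3 ∨ data.headI.length < 3
  · -- no interior: A's loops do nothing, B returns the zero grids and a copy of data
    have hA : SobelIt data
        = (List.replicate data.length (List.replicate data.headI.length (0 : Int)),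
           List.replicate data.length (List.replicate data.headI.length (0 : Int)), data) := by
      rw [hA0]
      rcases hdeg with hh | hw
      · rw [show data.length - 2 = 0 from by omega]
        rfl
      · rw [show data.headI.length - 2 = 0 from by omega]
        simp only [List.range'_zero, List.foldl_nil]
        exact pv_foldl_fixed _ _
    rw [hA]
    unfold SobelIt_alt
    rw [if_pos hdeg]
    simp
  · -- the interior case
    rw [not_or, Nat.not_lt, Nat.not_lt] at hdeg
    obtain ⟨hh3, hw3⟩ := hdeg
    set h := data.length with hhdef
    set w := data.headI.length with hwdef
    have hrect' : ∀ row ∈ data, row.length = w := hrect (by omega) (by omega)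
    have hshd : pvSh h w data := ⟨rfl, hrect'⟩
    have hshz : pvSh h w (List.replicate h (List.replicate w (0 : Int))) := by
      refine ⟨by simp, ?_⟩
      intro row hrow
      rw [List.eq_of_mem_replicate hrow]; simp
    set ps := (List.range' 1 (h-2)).flatMap (fun i => (List.range' 1 (w-2)).map (fun j => (i, j)))
      with hpsdef
    have hmem : ∀ i j : Nat, ((i, j) ∈ ps ↔ (0 < i ∧ i < h - 1) ∧ (0 < j ∧ j < w - 1)) := by
      intro i j
      simp only [hpsdef, List.mem_flatMap, List.mem_map, List.mem_range'_1, Prod.mk.injEq]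
      constructor
      · rintro ⟨a, ⟨ha1, ha2⟩, b, ⟨hb1, hb2⟩, rfl, rfl⟩; omega
      · rintro ⟨⟨h1, h2⟩, ⟨h3, h4⟩⟩
        exact ⟨i, ⟨by omega, by omega⟩, j, ⟨by omega, by omega⟩, rfl, rfl⟩
    have hps : ∀ p ∈ ps, p.1 < h ∧ p.2 < w := by
      intro p hp
      have := (hmem p.1 p.2).1 (by simpa using hp)
      omega
    have hA : SobelIt data = ps.foldl (pvStepA data)
        (List.replicate h (List.replicate w (0 : Int)),
         List.replicate h (List.replicate w (0 : Int)), data) := by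
      rw [hA0]
      exact pv_foldl_nest (pvStepA data) _ _ _
    obtain ⟨s1, s2, s3, cells⟩ :=
      pv_fold_cells data h w ps hps _ _ _ hshz hshz hshd
    rw [hA]
    unfold SobelIt_alt
    rw [if_neg (by omega)]
    set R := ps.foldl (pvStepA data)
        (List.replicate h (List.replicate w (0 : Int)),
         List.replicate h (List.replicate w (0 : Int)), data) with hRdef
    have hlenTbl : ∀ f, (pvTbl h w f).length = h := by intro f; simp [pvTbl]
    -- componentwise equality by extensionality on cells
    have keyx : R.1 = pvGxsB data h w := by
      apply List.ext_getElem (by rw [s1.1, pvGxsB, hlenTbl])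
      intro i hi1 hi2
      have hih : i < h := by rw [s1.1] at hi1; exact hi1
      apply List.ext_getElem
      · rw [s1.2 _ (List.getElem_mem _)]
        simp [pvGxsB, pvTbl]
      intro j hj1 hj2
      have hjw : j < w := by
        have := s1.2 _ (List.getElem_mem (l := R.1) hi1); omega
      rw [pvGet2_eq_getElem hi1 hj1,
          pvGet2_eq_getElem (m := pvGxsB data h w) (by rw [pvGxsB, hlenTbl]; exact hih)
            (by simpa using hj2)]
      rw [(cells i j).1]
      by_cases hin : (0 < i ∧ i < h - 1) ∧ (0 < j ∧ j < w - 1)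
      · rw [if_pos ((hmem i j).2 hin)]
        rw [pvGxsB_cell data h w i j hhdef hin.1.1 hin.1.2 hin.2.1 hin.2.2]
      · rw [if_neg (fun hc => hin ((hmem i j).1 hc))]
        rw [pvGet2_replicate]
        rw [pvGxsB, pvTbl_get2, if_pos ⟨hih, hjw⟩, if_neg hin]
    have keyy : R.2.1 = pvGysB data h w := by
      apply List.ext_getElem (by rw [s2.1, pvGysB, hlenTbl])
      intro i hi1 hi2
      have hih : i < h := by rw [s2.1] at hi1; exact hi1
      apply List.ext_getElem
      · rw [s2.2 _ (List.getElem_mem _)]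
        simp [pvGysB, pvTbl]
      intro j hj1 hj2
      have hjw : j < w := by
        have := s2.2 _ (List.getElem_mem (l := R.2.1) hi1); omega
      rw [pvGet2_eq_getElem hi1 hj1,
          pvGet2_eq_getElem (m := pvGysB data h w) (by rw [pvGysB, hlenTbl]; exact hih)
            (by simpa using hj2)]
      rw [(cells i j).2.1]
      by_cases hin : (0 < i ∧ i < h - 1) ∧ (0 < j ∧ j < w - 1)
      · rw [if_pos ((hmem i j).2 hin)]
        rw [pvGysB_cell data h w i j hin.1.1 hin.1.2 hin.2.1 hin.2.2]
      · rw [if_neg (fun hc => hin ((hmem i j).1 hc))]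
        rw [pvGet2_replicate]
        rw [pvGysB, pvTbl_get2, if_pos ⟨hih, hjw⟩, if_neg hin]
    have keys : R.2.2 = pvGsB data h w := by
      apply List.ext_getElem (by rw [s3.1, pvGsB, hlenTbl])
      intro i hi1 hi2
      have hih : i < h := by rw [s3.1] at hi1; exact hi1
      apply List.ext_getElem
      · rw [s3.2 _ (List.getElem_mem _)]
        simp [pvGsB, pvTbl]
      intro j hj1 hj2
      have hjw : j < w := by
        have := s3.2 _ (List.getElem_mem (l := R.2.2) hi1); omega
      rw [pvGet2_eq_getElem hi1 hj1,
          pvGet2_eq_getElem (m := pvGsB data h w) (by rw [pvGsB, hlenTbl]; exact hih)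
            (by simpa using hj2)]
      rw [(cells i j).2.2]
      by_cases hin : (0 < i ∧ i < h - 1) ∧ (0 < j ∧ j < w - 1)
      · rw [if_pos ((hmem i j).2 hin)]
        rw [pvGsB, pvTbl_get2, if_pos ⟨hih, hjw⟩, if_pos hin]
        rw [pvGxsB_cell data h w i j hhdef hin.1.1 hin.1.2 hin.2.1 hin.2.2,
            pvGysB_cell data h w i j hin.1.1 hin.1.2 hin.2.1 hin.2.2]
      · rw [if_neg (fun hc => hin ((hmem i j).1 hc))]
        rw [pvGsB, pvTbl_get2, if_pos ⟨hih, hjw⟩, if_neg hin]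
    exact Prod.ext keyx (Prod.ext keyy keys)
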